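-- pv_equiv track=rewrite | github.com/Victor-Grinan-Dev/victoolspy | function_resources/solved_exercises.py | make_bricks1
-- ===== SOURCE A (Python) =====
-- def make_bricks1(small, big, goal):
--     """works fine, not in the page"""
--     leftover = goal
--     big_value = 5
--     for brick in range(big):
--         if leftover - big_value >= 0:
--             leftover -= big_value
--
--     if small >= leftover >= 0:
--         return True
--
--     return False
-- ===== SOURCE B (Python) =====
-- def make_bricks1(small, big, goal):
--     """O(1) closed form: use as many big bricks as fit (at most big), check rest."""
--     used = max(0, min(big, goal // 5))
--     leftover = goal - 5 * used
--     return 0 <= leftover <= small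
-- ===== Notes on version B (the rewrite author's own statement) =====
-- stated objective: faster
-- what changed: Replaces the O(big) loop that subtracts 5 per big brick with a closed-form count used = max(0, min(big, goal // 5)) and a direct bound check.
import Mathlib
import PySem

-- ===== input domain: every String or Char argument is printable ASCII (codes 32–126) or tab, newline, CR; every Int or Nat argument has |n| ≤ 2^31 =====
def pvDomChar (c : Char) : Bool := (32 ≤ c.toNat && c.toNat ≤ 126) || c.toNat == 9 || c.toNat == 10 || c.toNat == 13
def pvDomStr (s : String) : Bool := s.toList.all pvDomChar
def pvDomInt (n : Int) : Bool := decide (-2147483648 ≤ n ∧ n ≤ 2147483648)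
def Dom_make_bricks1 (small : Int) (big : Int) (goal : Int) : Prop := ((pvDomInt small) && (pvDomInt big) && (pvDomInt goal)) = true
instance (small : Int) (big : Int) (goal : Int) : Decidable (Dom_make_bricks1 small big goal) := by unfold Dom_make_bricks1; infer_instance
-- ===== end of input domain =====

-- B replaces A's O(big) subtraction loop by an O(1) closed form; same return value everywhere.

-- ===== PORT A =====
-- for brick in range(big): if leftover - 5 >= 0: leftover -= 5
def make_bricks1 (small : Int) (big : Int) (goal : Int) : Bool :=
  let leftover := (PySem.List.pyRange 0 big 1).foldl
    (fun lo _ => if lo - 5 ≥ 0 then lo - 5 else lo) goal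
  if small ≥ leftover ∧ leftover ≥ 0 then true else false

-- ===== PORT B =====
-- used = max(0, min(big, goal // 5)); leftover = goal - 5*used; return 0 <= leftover <= small
def make_bricks1_alt (small : Int) (big : Int) (goal : Int) : Bool :=
  let used := max 0 (min big (PySem.Int.floordiv goal 5))
  let leftover := goal - 5 * used
  decide (0 ≤ leftover ∧ leftover ≤ small)

-- ===== PRECONDITION & SPEC =====
def Spec_make_bricks1 (small : Int) (big : Int) (goal : Int) (out : Bool) : Prop := out = make_bricks1_alt small big goal
instance (small : Int) (big : Int) (goal : Int) (out : Bool) : Decidable (Spec_make_bricks1 small big goal out) := by unfold Spec_make_bricks1; infer_instance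

-- ===== CLAIM (what is proved, stated in full; the proofs are below) =====
def Claim_equal_make_bricks1 : Prop := ∀ (small : Int) (big : Int) (goal : Int), Dom_make_bricks1 small big goal → Spec_make_bricks1 small big goal (make_bricks1 small big goal)

-- ===== LEMMAS AND PROOFS =====

-- A's loop body ignores the loop variable, so a foldl over any list is an iterate of its length
theorem foldl_ignore_eq_iterate {α : Type} (f : Int → Int) (l : List α) (g : Int) :
    l.foldl (fun lo _ => f lo) g = f^[l.length] g := by
  induction l generalizing g with
  | nil => rfl
  | cons a t ih => simpa [Function.iterate_succ_apply] using ih (f g)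

-- closed form for n steps of A's loop body
theorem iterate_step (n : Nat) (g : Int) :
    (fun lo => if lo - 5 ≥ 0 then lo - 5 else lo)^[n] g
      = g - 5 * min (n : Int) (max 0 (PySem.Int.floordiv g 5)) := by
  induction n generalizing g with
  | zero => simp
  | succ n ih =>
    rw [Function.iterate_succ_apply, ih]
    have h5 : PySem.Int.floordiv g 5 = g / 5 := PySem.Int.floordiv_eq_ediv_of_pos (by omega)
    by_cases h : g - 5 ≥ 0
    · have h5' : PySem.Int.floordiv (g - 5) 5 = (g - 5) / 5 :=
        PySem.Int.floordiv_eq_ediv_of_pos (by omega)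
      simp only [if_pos h, h5, h5']
      omega
    · simp only [if_neg h, h5]
      omega

theorem make_bricks1_closed (small big goal : Int) :
    make_bricks1 small big goal = make_bricks1_alt small big goal := by
  unfold make_bricks1 make_bricks1_alt
  rw [foldl_ignore_eq_iterate, PySem.List.length_pyRange_one, iterate_step]
  have h5 : PySem.Int.floordiv goal 5 = goal / 5 := PySem.Int.floordiv_eq_ediv_of_pos (by omega)
  rw [h5]
  have hb : ((big - 0).toNat : Int) = max 0 big := by omega
  rw [hb]
  by_cases h : 0 ≤ goal - 5 * max 0 (min big (goal / 5)) ∧ goal - 5 * max 0 (min big (goal / 5)) ≤ small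
  · rw [if_pos (by omega), decide_eq_true_iff.mpr h]
  · rw [if_neg (by omega), eq_comm, decide_eq_false_iff_not]
    omega

-- ===== VERDICT (by name: the statement is the Claim_ definition above) =====
theorem make_bricks1_spec : Claim_equal_make_bricks1 := by
  intro small big goal _
  exact make_bricks1_closed small big goal
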